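-- pv_equiv track=rewrite | github.com/MALIKOVW/tropical-sloth-slot | backup/app.py | calculate_winnings
-- ===== SOURCE A (Python) =====
-- def calculate_winnings(result, bet):
--     paylines = [
--         # Horizontal lines
--         [(0,0), (1,0), (2,0), (3,0), (4,0)],  # Top
--         [(0,1), (1,1), (2,1), (3,1), (4,1)],  # Middle
--         [(0,2), (1,2), (2,2), (3,2), (4,2)],  # Bottom
--         # V-shaped lines
--         [(0,0), (1,1), (2,2), (3,1), (4,0)],  # V
--         [(0,2), (1,1), (2,0), (3,1), (4,2)],  # Inverted V
--         # Zigzag lines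
--         [(0,0), (1,1), (2,0), (3,1), (4,0)],
--         [(0,2), (1,1), (2,2), (3,1), (4,2)]
--     ]
--
--     winnings = 0
--     for line in paylines:
--         symbols = [result[x][y] for x, y in line]
--
--         # Get base symbol (first non-wild symbol)
--         base_symbol = next((s for s in symbols if not s.startswith('wild_') and s != 'sloth'), None)
--
--         if base_symbol:
--             # Calculate multiplier from wilds
--             multiplier = 1
--             wild_count = 0
--             for symbol in symbols:
--                 if symbol.startswith('wild_'):
--                     wild_count += 1
--                     if symbol == 'wild_2x':
--                         multiplier *= 2
--                     elif symbol == 'wild_3x':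
--                         multiplier *= 3
--                     elif symbol == 'wild_5x':
--                         multiplier *= 5
--
--             # Check if we have a winning combination
--             if all(s == base_symbol or s.startswith('wild_') for s in symbols):
--                 # Calculate base win amount based on symbol value
--                 symbol_values = {
--                     'wooden_a': 2,
--                     'wooden_k': 3,
--                     'wooden_arch': 4,
--                     'snake': 5,
--                     'gorilla': 6,
--                     'jaguar': 8,
--                     'crocodile': 10,
--                     'gator': 15,
--                     'leopard': 20,
--                     'dragon': 50
--                 }
--
--                 base_value = symbol_values.get(base_symbol, 0)
--                 line_win = bet * base_value * multiplier
--                 winnings += line_win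
--
--     return winnings
-- ===== SOURCE B (Python) =====
-- WILD_MULT = {'wild_2x': 2, 'wild_3x': 3, 'wild_5x': 5}
--
-- SYMBOL_VALUES = {
--     'wooden_a': 2, 'wooden_k': 3, 'wooden_arch': 4, 'snake': 5,
--     'gorilla': 6, 'jaguar': 8, 'crocodile': 10, 'gator': 15,
--     'leopard': 20, 'dragon': 50
-- }
--
-- # Every payline visits columns 0..4 in order, so a line is just its five row indices.
-- LINE_ROWS = [
--     [0, 0, 0, 0, 0],
--     [1, 1, 1, 1, 1],
--     [2, 2, 2, 2, 2],
--     [0, 1, 2, 1, 0],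
--     [2, 1, 0, 1, 2],
--     [0, 1, 0, 1, 0],
--     [2, 1, 2, 1, 2],
-- ]
--
--
-- def calculate_winnings(result, bet):
--     total = 0
--     for rows in LINE_ROWS:
--         sym = None          # the unique non-wild symbol seen so far
--         mult = 1
--         ok = True
--         for x, y in enumerate(rows):
--             s = result[x][y]
--             if s.startswith('wild_'):
--                 mult *= WILD_MULT.get(s, 1)
--             elif sym is None:
--                 sym = s
--             elif s != sym:
--                 ok = False
--                 break
--         if ok and sym is not None and sym != 'sloth':
--             total += bet * SYMBOL_VALUES.get(sym, 0) * mult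
--     return total
-- ===== Notes on version B (the rewrite author's own statement) =====
-- stated objective: alternative
-- what changed: B re-represents each payline by its five row indices (all lines scan columns 0..4), and replaces A's find-first-base plus full-line rescan with one early-exit unification pass per line that tracks the unique non-wild symbol (None at start, fail on mismatch) and multiplies via a wild->factor dict; a line wins iff the pass succeeds with a non-None, non-'sloth' symbol.
import Mathlib
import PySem

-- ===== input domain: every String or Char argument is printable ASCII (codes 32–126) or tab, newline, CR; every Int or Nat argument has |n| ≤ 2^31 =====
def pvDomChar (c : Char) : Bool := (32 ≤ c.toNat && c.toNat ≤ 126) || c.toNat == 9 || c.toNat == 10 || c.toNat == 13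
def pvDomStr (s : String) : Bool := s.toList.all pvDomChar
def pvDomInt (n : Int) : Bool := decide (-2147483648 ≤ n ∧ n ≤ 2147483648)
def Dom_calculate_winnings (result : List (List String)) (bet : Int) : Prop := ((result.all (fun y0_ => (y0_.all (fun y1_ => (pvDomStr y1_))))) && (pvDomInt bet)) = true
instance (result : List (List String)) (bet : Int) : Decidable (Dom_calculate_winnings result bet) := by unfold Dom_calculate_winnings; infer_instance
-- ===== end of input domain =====

-- B re-represents each payline by its five row indices and replaces A's find-first-base +
-- full-line rescan with one early-exit unification pass (unique non-wild symbol + wild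
-- multiplier dict); objective: alternative, same cost.


-- ===== PORT A =====
def pvAPaylines : List (List (Int × Int)) :=
  [ [(0,0), (1,0), (2,0), (3,0), (4,0)],
    [(0,1), (1,1), (2,1), (3,1), (4,1)],
    [(0,2), (1,2), (2,2), (3,2), (4,2)],
    [(0,0), (1,1), (2,2), (3,1), (4,0)],
    [(0,2), (1,1), (2,0), (3,1), (4,2)],
    [(0,0), (1,1), (2,0), (3,1), (4,0)],
    [(0,2), (1,1), (2,2), (3,1), (4,2)] ]

def pvASymbolValues : PySem.Dict String Int :=
  PySem.Dict.ofList
    [ ("wooden_a", 2), ("wooden_k", 3), ("wooden_arch", 4), ("snake", 5), ("gorilla", 6),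
      ("jaguar", 8), ("crocodile", 10), ("gator", 15), ("leopard", 20), ("dragon", 50) ]

-- result[x][y]; total via defaults, exact under Pre_ (indices in range)
def pvASym (result : List (List String)) (xy : Int × Int) : String :=
  PySem.List.pyGetD (PySem.List.pyGetD result xy.1 []) xy.2 ""

def pvAWild (s : String) : Bool := PySem.Str.startswith s "wild_"

-- A's 'wild_2x'/'wild_3x'/'wild_5x' elif chain
def pvAMultStep (m : Int) (s : String) : Int :=
  if s = "wild_2x" then m * 2 else if s = "wild_3x" then m * 3 else if s = "wild_5x" then m * 5 else m

def calculate_winnings (result : List (List String)) (bet : Int) : Int :=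
  pvAPaylines.foldl (fun winnings line =>
    let symbols := line.map (fun xy => pvASym result xy)
    match symbols.find? (fun s => !(pvAWild s) && !(s == "sloth")) with
    | none => winnings
    | some base =>
      if base = "" then winnings
      else
        let mw := symbols.foldl (fun (mw : Int × Int) s =>
          if pvAWild s then (pvAMultStep mw.1 s, mw.2 + 1) else mw) ((1 : Int), (0 : Int))
        if symbols.all (fun s => s == base || pvAWild s) then
          winnings + bet * PySem.Dict.getD pvASymbolValues base 0 * mw.1
        else winnings) 0

-- ===== PORT B =====
def pvBWildMult : PySem.Dict String Int :=
  PySem.Dict.ofList [("wild_2x", 2), ("wild_3x", 3), ("wild_5x", 5)]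

def pvBSymbolValues : PySem.Dict String Int :=
  PySem.Dict.ofList
    [ ("wooden_a", 2), ("wooden_k", 3), ("wooden_arch", 4), ("snake", 5), ("gorilla", 6),
      ("jaguar", 8), ("crocodile", 10), ("gator", 15), ("leopard", 20), ("dragon", 50) ]

def pvBLineRows : List (List Int) :=
  [ [0, 0, 0, 0, 0],
    [1, 1, 1, 1, 1],
    [2, 2, 2, 2, 2],
    [0, 1, 2, 1, 0],
    [2, 1, 0, 1, 2],
    [0, 1, 0, 1, 0],
    [2, 1, 2, 1, 2] ]

-- B's inner for-loop with break: none = broke (mismatch), some (sym, mult) otherwise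
def pvBScan (result : List (List String)) : List Int → Int → Option String → Int → Option (Option String × Int)
  | [], _, sym, mult => some (sym, mult)
  | y :: ys, x, sym, mult =>
    let s := PySem.List.pyGetD (PySem.List.pyGetD result x []) y ""
    if PySem.Str.startswith s "wild_" then
      pvBScan result ys (x + 1) sym (mult * PySem.Dict.getD pvBWildMult s 1)
    else
      match sym with
      | none => pvBScan result ys (x + 1) (some s) mult
      | some t => if s = t then pvBScan result ys (x + 1) sym mult else none

def calculate_winnings_alt (result : List (List String)) (bet : Int) : Int :=
  pvBLineRows.foldl (fun total rows =>
    match pvBScan result rows 0 none 1 with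
    | some (some sym, mult) =>
      if sym ≠ "sloth" then total + bet * PySem.Dict.getD pvBSymbolValues sym 0 * mult else total
    | _ => total) 0

-- ===== PRECONDITION & SPEC =====
-- Both Pythons index result[x][y] for x in 0..4, y in 0..2: on smaller grids A (and B) raise IndexError.
def Pre_calculate_winnings (result : List (List String)) (bet : Int) : Prop :=
  5 ≤ result.length ∧ ∀ col ∈ result.take 5, 3 ≤ col.length
instance (result : List (List String)) (bet : Int) : Decidable (Pre_calculate_winnings result bet) := by
  unfold Pre_calculate_winnings; infer_instance

def pvWitness_calculate_winnings : List (List String) × Int :=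
  ([["snake", "snake", "sloth"], ["snake", "wild_2x", "sloth"], ["snake", "snake", "gator"],
    ["wild_3x", "snake", "sloth"], ["snake", "snake", "dragon"]], 2)

def Spec_calculate_winnings (result : List (List String)) (bet : Int) (out : Int) : Prop := out = calculate_winnings_alt result bet
instance (result : List (List String)) (bet : Int) (out : Int) : Decidable (Spec_calculate_winnings result bet out) := by unfold Spec_calculate_winnings; infer_instance

-- ===== CLAIM (what is proved, stated in full; the proofs are below) =====
def Claim_equal_calculate_winnings : Prop := ∀ (result : List (List String)) (bet : Int), Dom_calculate_winnings result bet → Pre_calculate_winnings result bet → Spec_calculate_winnings result bet (calculate_winnings result bet)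

-- ===== LEMMAS AND PROOFS =====

-- proof-side abstraction of pvBScan over the symbol sequence it reads
def pvScanSyms : List String → Option String → Int → Option (Option String × Int)
  | [], sym, mult => some (sym, mult)
  | s :: ss, sym, mult =>
    if pvAWild s then pvScanSyms ss sym (mult * PySem.Dict.getD pvBWildMult s 1)
    else
      match sym with
      | none => pvScanSyms ss (some s) mult
      | some t => if s = t then pvScanSyms ss sym mult else none

def pvSyms (result : List (List String)) : List Int → Int → List String
  | [], _ => []
  | y :: ys, x => pvASym result (x, y) :: pvSyms result ys (x + 1)

theorem pvBScan_eq_scanSyms (result : List (List String)) (ys : List Int) (x : Int)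
    (sym : Option String) (m : Int) :
    pvBScan result ys x sym m = pvScanSyms (pvSyms result ys x) sym m := by
  induction ys generalizing x sym m with
  | nil => rfl
  | cons y t ih =>
    simp only [pvBScan, pvScanSyms, pvSyms, pvASym, pvAWild]
    by_cases h : PySem.Str.startswith (PySem.List.pyGetD (PySem.List.pyGetD result x []) y "") "wild_"
    · simp [ih]
    · simp only [h, Bool.false_eq_true, if_false]
      cases sym with
      | none => simp [ih]
      | some t' => split <;> simp [ih]

def pvMultFold (ss : List String) (m : Int) : Int :=
  ss.foldl (fun m s => if pvAWild s then pvAMultStep m s else m) m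

theorem pvMultStep_eq (m : Int) (s : String) :
    pvAMultStep m s = m * PySem.Dict.getD pvBWildMult s 1 := by
  have hmk : pvBWildMult = PySem.Dict.mk [("wild_2x", 2), ("wild_3x", 3), ("wild_5x", 5)] := by decide
  rw [hmk, PySem.Dict.getD_eq_get?_getD]
  unfold pvAMultStep
  by_cases h2 : s = "wild_2x"
  · subst h2; simp [PySem.Dict.get?_mk_cons]
  · by_cases h3 : s = "wild_3x"
    · subst h3; simp [PySem.Dict.get?_mk_cons, h2]
    · by_cases h5 : s = "wild_5x"
      · subst h5; simp [PySem.Dict.get?_mk_cons]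
      · simp [PySem.Dict.get?_mk_cons, PySem.Dict.get?, h2, h3, h5,
          Ne.symm h2, Ne.symm h3, Ne.symm h5]

theorem pv_foldA_mult (ss : List String) (m c : Int) :
    (ss.foldl (fun (mw : Int × Int) s =>
      if pvAWild s then (pvAMultStep mw.1 s, mw.2 + 1) else mw) (m, c)).1
    = pvMultFold ss m := by
  induction ss generalizing m c with
  | nil => rfl
  | cons x t ih => unfold pvMultFold; by_cases h : pvAWild x <;> simp [h, ih, pvMultFold]

theorem pvScanSyms_some (ss : List String) (t : String) (m : Int) :
    pvScanSyms ss (some t) m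
    = if (ss.filter (fun s => !(pvAWild s))).all (fun s => s == t)
      then some (some t, pvMultFold ss m) else none := by
  induction ss generalizing m with
  | nil => simp [pvScanSyms, pvMultFold]
  | cons s r ih =>
    simp only [pvScanSyms, List.filter_cons]
    by_cases h : pvAWild s
    · have hm : pvMultFold (s :: r) m = pvMultFold r (m * PySem.Dict.getD pvBWildMult s 1) := by
        simp [pvMultFold, h, pvMultStep_eq]
      simp only [h, if_true, Bool.not_true, Bool.false_eq_true, if_false, hm, ih]
    · have hm : pvMultFold (s :: r) m = pvMultFold r m := by simp [pvMultFold, h]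
      simp only [h, Bool.false_eq_true, if_false, Bool.not_false, if_true, List.all_cons, hm]
      by_cases hst : s = t
      · subst hst
        rw [if_pos rfl, ih]
        simp
      · have hb : (s == t) = false := by simp [hst]
        simp [hst, hb]

theorem pvScanSyms_none (ss : List String) (m : Int) :
    pvScanSyms ss none m
    = match ss.filter (fun s => !(pvAWild s)) with
      | [] => some (none, pvMultFold ss m)
      | h :: t =>
        if (t.all (fun s => s == h)) then some (some h, pvMultFold ss m) else none := by
  induction ss generalizing m with
  | nil => simp [pvScanSyms, pvMultFold]
  | cons s r ih =>
    simp only [pvScanSyms, List.filter_cons]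
    by_cases h : pvAWild s
    · have hm : pvMultFold (s :: r) m = pvMultFold r (m * PySem.Dict.getD pvBWildMult s 1) := by
        simp [pvMultFold, h, pvMultStep_eq]
      simp only [h, if_true, Bool.not_true, Bool.false_eq_true, if_false, hm, ih]
    · have hm : pvMultFold (s :: r) m = pvMultFold r m := by simp [pvMultFold, h]
      simp only [h, Bool.false_eq_true, if_false, Bool.not_false, if_true, hm]
      rw [pvScanSyms_some]

theorem pv_find?_filter_eq (ss : List String) :
    ss.find? (fun s => !(pvAWild s) && !(s == "sloth"))
    = (ss.filter (fun s => !(pvAWild s))).find? (fun s => !(s == "sloth")) := by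
  rw [List.find?_filter]
  congr 1
  funext s
  cases h : pvAWild s <;> cases h2 : s == "sloth" <;> simp

theorem pv_all_filter_eq (ss : List String) (b : String) :
    ss.all (fun s => s == b || pvAWild s)
    = ((ss.filter (fun s => !(pvAWild s))).all (fun s => s == b)) := by
  rw [List.all_filter]
  congr 1
  funext s
  cases h : pvAWild s <;> cases h2 : s == b <;> simp

theorem pvDicts_eq : pvASymbolValues = pvBSymbolValues := by decide

-- the core per-line win test over the filtered (non-wild) symbols
theorem pv_core (bet M w : Int) (nw : List String) :
    (match nw.find? (fun s => !(s == "sloth")) with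
     | none => w
     | some base =>
       if base = "" then w
       else if nw.all (fun s => s == base) then
         w + bet * PySem.Dict.getD pvASymbolValues base 0 * M
       else w)
    = (match nw with
       | [] => w
       | h :: t =>
         if (t.all (fun s => s == h)) then
           (if h ≠ "sloth" then w + bet * PySem.Dict.getD pvBSymbolValues h 0 * M else w)
         else w) := by
  rw [← pvDicts_eq]
  cases nw with
  | nil => rfl
  | cons h t =>
    by_cases hall : ∀ s ∈ t, s = h
    · have hallb : t.all (fun s => s == h) = true := by
        rw [List.all_eq_true]; intro x hx; simp [hall x hx]
      by_cases hsl : h = "sloth"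
      · subst hsl
        have hfind : (("sloth" : String) :: t).find? (fun s => !(s == "sloth")) = none := by
          rw [List.find?_eq_none]
          intro x hx
          rcases List.mem_cons.mp hx with h1 | h1
          · simp [h1]
          · simp [hall x h1]
        rw [hfind]
        simp [hallb]
      · have hfind : (h :: t).find? (fun s => !(s == "sloth")) = some h := by
          apply List.find?_cons_of_pos; simp [hsl]
        rw [hfind]
        have hallb2 : (h :: t).all (fun s => s == h) = true := by simp [hallb]
        by_cases he : h = ""
        · subst he
          have hv : PySem.Dict.getD pvASymbolValues "" 0 = 0 := by decide
          simp [hv, hsl, hallb]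
        · simp [he, hallb2, hallb, hsl]
    · push Not at hall
      obtain ⟨z, hz, hzne⟩ := hall
      have hnallt : t.all (fun s => s == h) = false := by
        by_contra hcon
        have : t.all (fun s => s == h) = true := by
          cases hx : t.all (fun s => s == h)
          · exact absurd hx hcon
          · rfl
        rw [List.all_eq_true] at this
        exact hzne (by simpa using this z hz)
      simp only [hnallt, Bool.false_eq_true, if_false]
      cases hfind : (h :: t).find? (fun s => !(s == "sloth")) with
      | none => rfl
      | some base =>
        by_cases he : base = ""
        · simp [he]
        · have hnall : (h :: t).all (fun s => s == base) = false := by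
            by_contra hcon
            have htrue : (h :: t).all (fun s => s == base) = true := by
              cases hx : (h :: t).all (fun s => s == base)
              · exact absurd hx hcon
              · rfl
            rw [List.all_eq_true] at htrue
            have h1 : h = base := by simpa using htrue h (List.mem_cons_self)
            have h2 : z = base := by simpa using htrue z (List.mem_cons_of_mem _ hz)
            exact hzne (h2.trans h1.symm)
          simp [he, hnall]

-- per-payline equality of the two loop bodies, over an arbitrary symbol list
theorem pv_line_eq (bet w : Int) (ss : List String) :
    (match ss.find? (fun s => !(pvAWild s) && !(s == "sloth")) with
     | none => w
     | some base =>
       if base = "" then w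
       else
         let mw := ss.foldl (fun (mw : Int × Int) s =>
           if pvAWild s then (pvAMultStep mw.1 s, mw.2 + 1) else mw) ((1 : Int), (0 : Int))
         if ss.all (fun s => s == base || pvAWild s) then
           w + bet * PySem.Dict.getD pvASymbolValues base 0 * mw.1
         else w)
    = (match pvScanSyms ss none 1 with
       | some (some sym, mult) =>
         if sym ≠ "sloth" then w + bet * PySem.Dict.getD pvBSymbolValues sym 0 * mult else w
       | _ => w) := by
  rw [pvScanSyms_none, pv_find?_filter_eq]
  simp only [pv_foldA_mult, pv_all_filter_eq]
  have := pv_core bet (pvMultFold ss 1) w (ss.filter (fun s => !(pvAWild s)))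
  rw [this]
  cases hnw : ss.filter (fun s => !(pvAWild s)) with
  | nil => rfl
  | cons h t => by_cases ht : t.all (fun s => s == h) <;> simp [ht]

theorem pv_body_eq (result : List (List String)) (bet : Int)
    (line : List (Int × Int)) (rows : List Int)
    (hsym : line.map (fun xy => pvASym result xy) = pvSyms result rows 0) (w : Int) :
    (let symbols := line.map (fun xy => pvASym result xy)
     match symbols.find? (fun s => !(pvAWild s) && !(s == "sloth")) with
     | none => w
     | some base =>
       if base = "" then w
       else
         let mw := symbols.foldl (fun (mw : Int × Int) s =>
           if pvAWild s then (pvAMultStep mw.1 s, mw.2 + 1) else mw) ((1 : Int), (0 : Int))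
         if symbols.all (fun s => s == base || pvAWild s) then
           w + bet * PySem.Dict.getD pvASymbolValues base 0 * mw.1
         else w)
    = (match pvBScan result rows 0 none 1 with
       | some (some sym, mult) =>
         if sym ≠ "sloth" then w + bet * PySem.Dict.getD pvBSymbolValues sym 0 * mult else w
       | _ => w) := by
  rw [pvBScan_eq_scanSyms, ← hsym]
  exact pv_line_eq bet w _

theorem pv_chain (result : List (List String)) (bet : Int)
    (lines : List (List (Int × Int))) (rowss : List (List Int))
    (h : List.Forall₂ (fun line rows =>
      line.map (fun xy => pvASym result xy) = pvSyms result rows 0) lines rowss) :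
    ∀ w : Int,
    lines.foldl (fun winnings line =>
      let symbols := line.map (fun xy => pvASym result xy)
      match symbols.find? (fun s => !(pvAWild s) && !(s == "sloth")) with
      | none => winnings
      | some base =>
        if base = "" then winnings
        else
          let mw := symbols.foldl (fun (mw : Int × Int) s =>
            if pvAWild s then (pvAMultStep mw.1 s, mw.2 + 1) else mw) ((1 : Int), (0 : Int))
          if symbols.all (fun s => s == base || pvAWild s) then
            winnings + bet * PySem.Dict.getD pvASymbolValues base 0 * mw.1
          else winnings) w
    = rowss.foldl (fun total rows =>
        match pvBScan result rows 0 none 1 with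
        | some (some sym, mult) =>
          if sym ≠ "sloth" then total + bet * PySem.Dict.getD pvBSymbolValues sym 0 * mult else total
        | _ => total) w := by
  induction h with
  | nil => intro w; rfl
  | cons hpair htail ih =>
    intro w
    simp only [List.foldl_cons]
    rw [pv_body_eq result bet _ _ hpair w]
    exact ih _

-- ===== VERDICT (by name: the statement is the Claim_ definition above) =====
theorem calculate_winnings_spec : Claim_equal_calculate_winnings := by
  intro result bet _dom _pre
  unfold Spec_calculate_winnings calculate_winnings calculate_winnings_alt
  refine pv_chain result bet pvAPaylines pvBLineRows ?_ 0
  unfold pvAPaylines pvBLineRows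
  refine .cons ?_ (.cons ?_ (.cons ?_ (.cons ?_ (.cons ?_ (.cons ?_ (.cons ?_ .nil)))))) <;>
    norm_num [pvSyms]
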